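-- pv_equiv track=rewrite | github.com/lauralopezcruz/Magnus_Breakdown | magnus.py | get_new_letters
-- ===== SOURCE A (Python) =====
-- import string
--
-- def get_new_letters(used_letters, num_letters, preferred_letters=[]):
--     available_letters = list(string.ascii_lowercase)
--     available_letters.remove("i")
--     available_letters.remove("j")
--     greek_letters = ["alpha","beta","gamma","delta","epsilon","zeta","eta",
--                      "theta","iota","kappa","lambda","mu","nu","xi","pi","rho",
--                      "tau","phi","chi","psi","omega"]
--     for letter in greek_letters:
--         letter = "\\" + letter
--     available_letters.extend(greek_letters)
--
--     for letter in used_letters: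
--         available_letters.remove(letter)
--
--     for letter in reversed(preferred_letters):
--         if letter in available_letters:
--             available_letters.remove(letter)
--             available_letters.insert(0, letter)
--
--     return available_letters[:num_letters]
-- ===== SOURCE B (Python) =====
-- import string
--
-- def get_new_letters(used_letters, num_letters, preferred_letters=[]):
--     greek_letters = ["alpha","beta","gamma","delta","epsilon","zeta","eta",
--                      "theta","iota","kappa","lambda","mu","nu","xi","pi","rho",
--                      "tau","phi","chi","psi","omega"]
--     available = [c for c in string.ascii_lowercase if c not in "ij"] + greek_letters
--     for letter in used_letters:
--         available.remove(letter)
--     front = []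
--     for letter in preferred_letters:
--         if letter in available and letter not in front:
--             front.append(letter)
--     rest = [letter for letter in available if letter not in front]
--     return (front + rest)[:num_letters]
-- ===== Notes on version B (the rewrite author's own statement) =====
-- stated objective: simpler
-- what changed: Replaces A's in-place reversed move-to-front mutation (remove/insert(0) on the available list) with a single forward partition: one pass over preferred_letters collects the front list by first occurrence, the rest is a filter, and the result is front+rest sliced.
import Mathlib
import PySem

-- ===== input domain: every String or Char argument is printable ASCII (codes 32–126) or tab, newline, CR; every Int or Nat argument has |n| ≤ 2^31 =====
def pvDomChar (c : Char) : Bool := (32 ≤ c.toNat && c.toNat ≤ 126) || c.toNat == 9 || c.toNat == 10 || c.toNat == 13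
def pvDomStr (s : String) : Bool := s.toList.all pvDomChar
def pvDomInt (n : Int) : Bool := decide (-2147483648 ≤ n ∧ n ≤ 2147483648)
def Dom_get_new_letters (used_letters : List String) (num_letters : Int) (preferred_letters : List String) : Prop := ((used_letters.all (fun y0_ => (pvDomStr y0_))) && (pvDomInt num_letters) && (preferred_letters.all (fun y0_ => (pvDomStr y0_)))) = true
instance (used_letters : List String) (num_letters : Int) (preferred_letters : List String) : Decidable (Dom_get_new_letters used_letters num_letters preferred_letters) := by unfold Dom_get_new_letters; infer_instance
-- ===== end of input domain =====

-- B replaces A's in-place reversed move-to-front mutation by a forward partition (front by first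
-- occurrence, rest by a filter); Pre_ excludes the inputs on which both raise ValueError from list.remove.

-- ===== PORT A =====
def pvAscii : List String := ["a","b","c","d","e","f","g","h","i","j","k","l","m","n","o","p","q","r","s","t","u","v","w","x","y","z"]
def pvGreek : List String := ["alpha","beta","gamma","delta","epsilon","zeta","eta","theta","iota","kappa","lambda","mu","nu","xi","pi","rho","tau","phi","chi","psi","omega"]

def get_new_letters (used_letters : List String) (num_letters : Int) (preferred_letters : List String) : List String :=
  -- available_letters = list(string.ascii_lowercase); remove "i"; remove "j"
  let a0 := (PySem.List.remove? pvAscii "i").getD []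
  let a1 := (PySem.List.remove? a0 "j").getD []
  -- for letter in greek_letters: letter = "\\" + letter   -- rebinds the loop variable only: no effect
  let available := a1 ++ pvGreek
  -- for letter in used_letters: available_letters.remove(letter)   (ValueError = none, excluded by Pre_)
  match List.foldl (fun (acc : Option (List String)) l => acc.bind (fun s => PySem.List.remove? s l)) (some available) used_letters with
  | none => []
  | some avail =>
    -- for letter in reversed(preferred_letters): if letter in avail: remove it; insert at 0
    let final := List.foldl (fun t l => if l ∈ t then l :: ((PySem.List.remove? t l).getD t) else t) avail preferred_letters.reverse
    PySem.List.slice final none (some num_letters)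

-- ===== PORT B =====
def get_new_letters_alt (used_letters : List String) (num_letters : Int) (preferred_letters : List String) : List String :=
  let letters := (("abcdefghijklmnopqrstuvwxyz".toList.filter (fun c => c ∉ "ij".toList)).map (fun c => String.ofList [c])) ++ pvGreek
  -- for letter in used_letters: available.remove(letter)   (ValueError = none, excluded by Pre_)
  match List.foldl (fun (acc : Option (List String)) l => acc.bind (fun s => PySem.List.remove? s l)) (some letters) used_letters with
  | none => []
  | some available =>
    let front := List.foldl (fun acc l => if l ∈ available ∧ l ∉ acc then acc ++ [l] else acc) ([] : List String) preferred_letters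
    let rest := available.filter (fun l => l ∉ front)
    PySem.List.slice (front ++ rest) none (some num_letters)

-- ===== PRECONDITION & SPEC =====
def pvBase : List String := ["a","b","c","d","e","f","g","h","k","l","m","n","o","p","q","r","s","t","u","v","w","x","y","z","alpha","beta","gamma","delta","epsilon","zeta","eta","theta","iota","kappa","lambda","mu","nu","xi","pi","rho","tau","phi","chi","psi","omega"]

-- Pre_ excludes exactly the inputs on which A's sequential list.remove raises ValueError
-- (a used letter missing from the available alphabet, or listed twice); B raises there too.
def Pre_get_new_letters (used_letters : List String) (num_letters : Int) (preferred_letters : List String) : Prop :=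
  used_letters.Nodup ∧ ∀ l ∈ used_letters, l ∈ pvBase
instance (used_letters : List String) (num_letters : Int) (preferred_letters : List String) : Decidable (Pre_get_new_letters used_letters num_letters preferred_letters) := by unfold Pre_get_new_letters; infer_instance

def pvWitness_get_new_letters : List String × Int × List String := (["a", "mu"], 3, ["z", "b"])

def Spec_get_new_letters (used_letters : List String) (num_letters : Int) (preferred_letters : List String) (out : List String) : Prop := out = get_new_letters_alt used_letters num_letters preferred_letters
instance (used_letters : List String) (num_letters : Int) (preferred_letters : List String) (out : List String) : Decidable (Spec_get_new_letters used_letters num_letters preferred_letters out) := by unfold Spec_get_new_letters; infer_instance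

-- ===== CLAIM (what is proved, stated in full; the proofs are below) =====
def Claim_equal_get_new_letters : Prop := ∀ (used_letters : List String) (num_letters : Int) (preferred_letters : List String), Dom_get_new_letters used_letters num_letters preferred_letters → Pre_get_new_letters used_letters num_letters preferred_letters → Spec_get_new_letters used_letters num_letters preferred_letters (get_new_letters used_letters num_letters preferred_letters)
-- ===== LEMMAS AND PROOFS =====

-- 'pvM s p': the letters of p that are in s, deduplicated by first occurrence (B's front list).
def pvM (s : List String) : List String → List String
  | [] => []
  | x :: p => if x ∈ s then x :: (pvM s p).filter (fun y => y ≠ x) else pvM s p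

theorem pvM_subset (s : List String) (p : List String) : ∀ y ∈ pvM s p, y ∈ s := by
  induction p with
  | nil => simp [pvM]
  | cons x p ih =>
    intro y hy
    by_cases hx : x ∈ s
    · simp [pvM, hx] at hy
      rcases hy with h | h
      · exact h ▸ hx
      · exact ih y h.1
    · simp [pvM, hx] at hy
      exact ih y hy

theorem pvM_nodup (s : List String) (p : List String) : (pvM s p).Nodup := by
  induction p with
  | nil => simp [pvM]
  | cons x p ih =>
    by_cases hx : x ∈ s
    · simp only [pvM, if_pos hx]
      refine List.Nodup.cons ?_ (ih.filter _)
      intro hmem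
      have := List.of_mem_filter hmem
      simp at this
    · simpa [pvM, hx] using ih

-- B's forward front loop computes pvM, for any accumulator.
theorem pv_frontFold (s : List String) (p : List String) : ∀ acc : List String,
    List.foldl (fun acc l => if l ∈ s ∧ l ∉ acc then acc ++ [l] else acc) acc p
      = acc ++ (pvM s p).filter (fun y => y ∉ acc) := by
  induction p with
  | nil => intro acc; simp [pvM]
  | cons x p ih =>
    intro acc
    by_cases hx : x ∈ s
    · by_cases hacc : x ∈ acc
      · have : (if x ∈ s ∧ x ∉ acc then acc ++ [x] else acc) = acc := by simp [hacc]
        rw [List.foldl_cons, this, ih acc]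
        congr 1
        simp only [pvM, if_pos hx, List.filter_cons]
        have hxf : (decide (x ∉ acc)) = false := by simp [hacc]
        rw [hxf]
        simp only [List.filter_filter]
        apply List.filter_congr
        intro y hy
        by_cases hyx : y = x
        · subst hyx; simp [hacc]
        · simp [hyx]
      · have : (if x ∈ s ∧ x ∉ acc then acc ++ [x] else acc) = acc ++ [x] := by simp [hx, hacc]
        rw [List.foldl_cons, this, ih (acc ++ [x])]
        simp only [pvM, if_pos hx, List.filter_cons]
        have hxt : (decide (x ∉ acc)) = true := by simp [hacc]
        rw [hxt]
        simp only [List.append_assoc, List.singleton_append, List.filter_filter]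
        congr 2
        apply List.filter_congr
        intro y hy
        by_cases hyx : y = x
        · subst hyx; simp
        · simp [hyx, List.mem_append]
    · have : (if x ∈ s ∧ x ∉ acc then acc ++ [x] else acc) = acc := by simp [hx]
      rw [List.foldl_cons, this, ih acc]
      simp [pvM, hx]

-- A's reversed move-to-front loop partitions a duplicate-free list into pvM ++ the untouched rest.
theorem pv_mainFold (s : List String) (hs : s.Nodup) (p : List String) :
    List.foldl (fun t l => if l ∈ t then l :: ((PySem.List.remove? t l).getD t) else t) s p.reverse
      = pvM s p ++ s.filter (fun y => y ∉ pvM s p) := by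
  induction p with
  | nil => simp [pvM, List.filter_eq_self.mpr]
  | cons x p ih =>
    rw [List.reverse_cons, List.foldl_append, ih, List.foldl_cons, List.foldl_nil]
    by_cases hx : x ∈ s
    · have hnd : (pvM s p ++ s.filter (fun y => y ∉ pvM s p)).Nodup := by
        refine List.Nodup.append (pvM_nodup s p) (hs.filter _) ?_
        intro y hy hy2
        have := List.of_mem_filter hy2
        simp at this
        exact this hy
      have hmem : x ∈ pvM s p ++ s.filter (fun y => y ∉ pvM s p) := by
        by_cases hm : x ∈ pvM s p
        · exact List.mem_append_left _ hm
        · exact List.mem_append_right _ (List.mem_filter.mpr ⟨hx, by simpa using hm⟩)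
      rw [if_pos hmem, PySem.List.remove?_eq_some_erase _ x hmem, Option.getD_some,
          hnd.erase_eq_filter x]
      simp only [pvM, if_pos hx, List.filter_append, List.filter_filter]
      congr 2
      · apply List.filter_congr
        intro y hy
        by_cases hyx : y = x
        · subst hyx; simp
        · simp [hyx]
      · apply List.filter_congr
        intro y hy
        by_cases hyx : y = x
        · subst hyx; simp
        · simp only [decide_not]
          by_cases hym : y ∈ pvM s p <;> simp [hym, hyx]
    · have hnmem : x ∉ pvM s p ++ s.filter (fun y => y ∉ pvM s p) := by
        intro h
        rcases List.mem_append.mp h with h | h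
        · exact hx (pvM_subset s p x h)
        · exact hx (List.mem_of_mem_filter h)
      rw [if_neg hnmem]
      simp [pvM, hx]

-- Sequential list.remove of duplicate-free, all-present letters is a filter.
theorem pv_remFold (u : List String) : ∀ b : List String, b.Nodup → u.Nodup → (∀ l ∈ u, l ∈ b) →
    List.foldl (fun (acc : Option (List String)) l => acc.bind (fun s => PySem.List.remove? s l)) (some b) u
      = some (b.filter (fun y => y ∉ u)) := by
  induction u with
  | nil => intro b _ _ _; simp [List.filter_eq_self.mpr]
  | cons x u ih =>
    intro b hb hu hsub
    have hxb : x ∈ b := hsub x (List.mem_cons_self)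
    rw [List.foldl_cons]
    simp only [Option.bind_some]
    rw [PySem.List.remove?_eq_some_erase b x hxb, hb.erase_eq_filter x]
    rw [ih (b.filter (fun y => y != x)) (hb.filter _) (List.Nodup.of_cons hu) ?_]
    · congr 1
      simp only [List.filter_filter]
      apply List.filter_congr
      intro y hy
      by_cases hyx : y = x
      · subst hyx; simp
      · simp [hyx]
    · intro l hl
      refine List.mem_filter.mpr ⟨hsub l (List.mem_cons_of_mem _ hl), ?_⟩
      have : l ≠ x := by
        rintro rfl
        exact (List.nodup_cons.mp hu).1 hl
      simp [this]

theorem get_new_letters_spec : Claim_equal_get_new_letters := by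
  intro used num pref _ hpre
  obtain ⟨hnd, hsub⟩ := hpre
  unfold Spec_get_new_letters
  simp only [get_new_letters, get_new_letters_alt]
  have hA : (PySem.List.remove? ((PySem.List.remove? pvAscii "i").getD []) "j").getD [] ++ pvGreek = pvBase := by decide
  have hB : (("abcdefghijklmnopqrstuvwxyz".toList.filter (fun c => c ∉ "ij".toList)).map (fun c => String.ofList [c])) ++ pvGreek = pvBase := by decide
  rw [hA, hB]
  set s := pvBase.filter (fun y => decide (y ∉ used)) with hs
  have hsnd : s.Nodup := List.Nodup.filter _ (by decide : pvBase.Nodup)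
  simp only [pv_remFold used pvBase (by decide) hnd hsub]
  rw [pv_mainFold s hsnd pref, pv_frontFold s pref []]
  simp only [List.nil_append, List.filter_filter]
  have hfin : List.filter (fun y => !decide (y ∈ pvM s pref)) s
      = List.filter (fun a => !decide (a ∈ pvM s pref) && !decide (a ∈ used)) pvBase := by
    rw [hs, List.filter_filter]
    apply List.filter_congr
    intro y _
    simp [Bool.and_comm]
  simp only [decide_not]
  rw [hfin]
  simp
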